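-- pv_equiv track=rewrite | github.com/rodinopps/Codewars | Python/7 Kyu/char-code-calculation.py | calc
-- ===== SOURCE A (Python) =====
-- def calc(x):
--     new = ""
--     total1 = 0
--     total2 = 0
--     for i in x:
--         new += str(ord(i))
--     old = new
--     new = new.replace("7", "1")
--     for i in old:
--         total1 += int(i)
--     for i in new:
--         total2 += int(i)
--     return total1 - total2
-- ===== SOURCE B (Python) =====
-- def calc(x):
--     total = 0
--     for c in x:
--         total += 6 * str(ord(c)).count("7")
--     return total
-- ===== Notes on version B (the rewrite author's own statement) =====
-- stated objective: faster
-- what changed: Replaces building the concatenated code string, a replace pass and two digit-sum loops by one pass that adds 6 times the count of digit 7 in str(ord(c)) per character, using the identity that only that digit contributes (7-1=6) to the difference.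
import Mathlib
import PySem

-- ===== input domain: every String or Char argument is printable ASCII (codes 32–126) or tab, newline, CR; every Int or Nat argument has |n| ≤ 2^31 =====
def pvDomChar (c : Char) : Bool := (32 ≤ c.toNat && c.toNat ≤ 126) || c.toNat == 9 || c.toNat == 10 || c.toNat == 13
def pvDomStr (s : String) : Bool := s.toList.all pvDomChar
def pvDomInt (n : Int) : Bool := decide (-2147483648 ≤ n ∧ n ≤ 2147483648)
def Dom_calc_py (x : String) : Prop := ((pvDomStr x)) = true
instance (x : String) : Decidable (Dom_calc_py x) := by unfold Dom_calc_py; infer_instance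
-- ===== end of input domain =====

-- B replaces A's build-concatenate / replace('7','1') / two digit-sum loops by one pass adding
-- 6 * str(ord(c)).count('7') per character (only '7' digits contribute, 7-1=6 each): simpler, no intermediate string.

-- ===== PORT A =====
-- int(i) where i is a single char of str(ord(..)): always a decimal digit there, so the
-- '.getD 0' default of ofChars? is never taken on any reachable value — exact on all inputs.
def calc_py (x : String) : Int :=
  let new : List Char := x.toList.foldl (fun acc i => acc ++ PySem.Int.toChars (i.toNat : Int)) []
  let old := new
  let new2 := PySem.Chars.replace new ['7'] ['1']
  let total1 := old.foldl (fun t i => t + (PySem.Int.ofChars? [i]).getD 0) 0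
  let total2 := new2.foldl (fun t i => t + (PySem.Int.ofChars? [i]).getD 0) 0
  total1 - total2

-- ===== PORT B =====
def calc_py_alt (x : String) : Int :=
  x.toList.foldl
    (fun total c => total + 6 * (PySem.Chars.count (PySem.Int.toChars (c.toNat : Int)) ['7'] : Int)) 0

-- ===== PRECONDITION & SPEC =====
def Spec_calc_py (x : String) (out : Int) : Prop := out = calc_py_alt x
instance (x : String) (out : Int) : Decidable (Spec_calc_py x out) := by unfold Spec_calc_py; infer_instance

-- ===== CLAIM (what is proved, stated in full; the proofs are below) =====
def Claim_equal_calc_py : Prop := ∀ (x : String), Dom_calc_py x → Spec_calc_py x (calc_py x)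

-- ===== LEMMAS AND PROOFS =====

-- Chars.count.go with a single-char needle is List.count (enough fuel).
theorem count_go_single (c : Char) : ∀ (l : List Char) (fuel acc : Nat), l.length ≤ fuel →
    PySem.Chars.count.go [c] fuel l acc = acc + l.count c := by
  intro l
  induction l with
  | nil => intro fuel acc h; cases fuel <;> simp [PySem.Chars.count.go]
  | cons d t ih =>
    intro fuel acc h
    cases fuel with
    | zero => simp at h
    | succ f =>
      simp only [PySem.Chars.count.go, List.isPrefixOf]
      by_cases hc : c = d
      · subst hc
        simp [ih f (acc + 1) (by simpa using h)]
        omega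
      · simp [hc, Ne.symm hc, ih f acc (by simpa using h)]

theorem count_single (c : Char) (l : List Char) :
    PySem.Chars.count l [c] = l.count c := by
  simpa [PySem.Chars.count] using count_go_single c l l.length 0 le_rfl

-- Chars.replace.go with single-char pattern and replacement is a charwise map (enough fuel).
theorem replace_go_single (c e : Char) : ∀ (l : List Char) (fuel : Nat) (acc : List Char),
    l.length ≤ fuel →
    PySem.Chars.replace.go [c] [e] fuel l acc =
      acc.reverse ++ l.map (fun d => if d = c then e else d) := by
  intro l
  induction l with
  | nil => intro fuel acc h; cases fuel <;> simp [PySem.Chars.replace.go]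
  | cons d t ih =>
    intro fuel acc h
    cases fuel with
    | zero => simp at h
    | succ f =>
      simp only [PySem.Chars.replace.go, List.isPrefixOf]
      by_cases hc : c = d
      · subst hc
        simp [ih f _ (by simpa using h)]
      · simp [hc, Ne.symm hc, ih f _ (by simpa using h)]

theorem replace_single (c e : Char) (l : List Char) :
    PySem.Chars.replace l [c] [e] = l.map (fun d => if d = c then e else d) := by
  simpa [PySem.Chars.replace] using replace_go_single c e l l.length [] le_rfl

-- digit-sum difference over a charwise '7'→'1' map is 6 per '7'
theorem sum_sub_sum_map (l : List Char) :
    (l.map (fun i => (PySem.Int.ofChars? [i]).getD 0)).sum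
      - ((l.map (fun d => if d = '7' then '1' else d)).map (fun i => (PySem.Int.ofChars? [i]).getD 0)).sum
      = 6 * (l.count '7' : Int) := by
  induction l with
  | nil => simp
  | cons d t ih =>
    by_cases hd : d = '7'
    · subst hd
      have h7 : (PySem.Int.ofChars? ['7']).getD 0 = 7 := by decide
      have h1 : (PySem.Int.ofChars? ['1']).getD 0 = 1 := by decide
      simp only [List.map_cons, List.sum_cons, List.count_cons_self, h7]
      push_cast
      omega
    · simp only [List.map_cons, List.sum_cons, if_neg hd, List.count_cons_of_ne (by simpa using hd)]
      omega

-- count of '7' in a flatMap is the sum of per-part counts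
theorem count_flatMap_seven (x : List Char) (g : Char → List Char) :
    ((x.flatMap g).count '7' : Int) = (x.map (fun c => ((g c).count '7' : Int))).sum := by
  induction x with
  | nil => simp
  | cons h t ih => simp [List.count_append, ih]

-- ===== VERDICT (by name: the statement is the Claim_ definition above) =====
theorem calc_py_spec : Claim_equal_calc_py := by
  intro x _
  unfold Spec_calc_py calc_py calc_py_alt
  simp only [PySem.List.foldl_add, zero_add]
  rw [← List.flatMap_eq_foldl, replace_single, sum_sub_sum_map, count_flatMap_seven]
  simp only [count_single]
  rw [List.sum_map_mul_left]
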